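-- pv_equiv track=rewrite | github.com/buxucixingztx/cpp_learning | leetcode/leetcode_p486/code_486.py | first_score
-- ===== SOURCE A (Python) =====
-- def first_score(nums, flag=True):
--     if len(nums) == 1:
--         return nums[0]
--     if flag:
--         if len(nums) == 2:
--             return max(nums)
--         right = first_score(nums[1:], flag=False) + nums[0]
--         left = first_score(nums[:-1], flag=False) + nums[-1]
--         return right if right >= left else left
--     else:
--         if len(nums) == 2:
--             return min(nums)
--         right = first_score(nums[1:], flag=True)
--         left = first_score(nums[:-1], flag=True)
--
--         return left if right >= left else right
-- ===== SOURCE B (Python) =====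
-- def first_score(nums, flag=True):
--     memo = {}
--
--     def solve(i, j, f):
--         key = (i, j, f)
--         if key in memo:
--             return memo[key]
--         if j - i == 1:
--             res = nums[i]
--         elif f:
--             if j - i == 2:
--                 res = max(nums[i], nums[j - 1])
--             else:
--                 res = max(solve(i + 1, j, False) + nums[i],
--                           solve(i, j - 1, False) + nums[j - 1])
--         else:
--             if j - i == 2:
--                 res = min(nums[i], nums[j - 1])
--             else:
--                 res = min(solve(i + 1, j, True), solve(i, j - 1, True))
--         memo[key] = res
--         return res
--
--     return solve(0, len(nums), flag)
-- ===== Notes on version B (the rewrite author's own statement) =====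
-- stated objective: faster
-- what changed: Replaced A's exponential recursion on list slices with a memoized recursion over (i, j, flag) index intervals, giving O(n^2) subproblems and no list copying.
import Mathlib
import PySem

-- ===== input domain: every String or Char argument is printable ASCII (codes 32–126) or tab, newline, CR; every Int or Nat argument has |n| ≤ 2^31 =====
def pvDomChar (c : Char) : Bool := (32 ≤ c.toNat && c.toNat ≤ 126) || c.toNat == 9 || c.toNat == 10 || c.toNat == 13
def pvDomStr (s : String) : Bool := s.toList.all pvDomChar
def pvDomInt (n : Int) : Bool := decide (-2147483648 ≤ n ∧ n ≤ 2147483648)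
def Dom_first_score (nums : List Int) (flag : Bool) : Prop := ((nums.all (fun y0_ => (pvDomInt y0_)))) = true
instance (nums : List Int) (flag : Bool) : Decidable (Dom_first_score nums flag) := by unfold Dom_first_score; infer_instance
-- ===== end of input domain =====

-- B replaces A's exponential slice-copying recursion by a memoized recursion over
-- (i, j, flag) index intervals (O(n^2) subproblems); objective: faster (asymptotic).

-- ===== PORT A =====
-- Literal transliteration of A: recursion on list slices nums[1:] / nums[:-1].
-- The `nums.length = 0` guard only makes the recursion total: Python diverges
-- (RecursionError) on [], which Pre_first_score excludes.
def first_score (nums : List Int) (flag : Bool) : Int :=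
  if nums.length = 1 then nums.headD 0
  else if _h : nums.length = 0 then 0
  else if flag then
    if nums.length = 2 then max (nums.headD 0) (nums.getD 1 0)
    else
      let right := first_score nums.tail false + nums.headD 0
      let left  := first_score nums.dropLast false + nums.getLastD 0
      if left ≤ right then right else left
  else
    if nums.length = 2 then min (nums.headD 0) (nums.getD 1 0)
    else
      let right := first_score nums.tail true
      let left  := first_score nums.dropLast true
      if left ≤ right then left else right
termination_by nums.length
decreasing_by
  all_goals simp only [List.length_tail, List.length_dropLast] <;> omega

-- ===== PORT B =====
-- Transliteration of B's inner `solve(i, j, f)` with d = j - i; the memo dict is a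
-- pure cache and is dropped in the port. d = 0 is unreachable from first_score_alt
-- on nonempty input (Python diverges there on []).
def solveB (nums : List Int) (i : Nat) (d : Nat) (flag : Bool) : Int :=
  match d with
  | 0 => 0
  | 1 => nums.getD i 0
  | Nat.succ (Nat.succ d') =>
    if flag then
      if d' = 0 then max (nums.getD i 0) (nums.getD (i + 1) 0)
      else max (solveB nums (i + 1) (d' + 1) false + nums.getD i 0)
               (solveB nums i (d' + 1) false + nums.getD (i + d' + 1) 0)
    else
      if d' = 0 then min (nums.getD i 0) (nums.getD (i + 1) 0)
      else min (solveB nums (i + 1) (d' + 1) true) (solveB nums i (d' + 1) true)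

def first_score_alt (nums : List Int) (flag : Bool) : Int :=
  solveB nums 0 nums.length flag

-- ===== PRECONDITION & SPEC =====
-- Pre_ excludes only the empty list, on which A recurses forever (RecursionError).
def Pre_first_score (nums : List Int) (flag : Bool) : Prop := nums ≠ []
instance (nums : List Int) (flag : Bool) : Decidable (Pre_first_score nums flag) := by
  unfold Pre_first_score; infer_instance
def pvWitness_first_score : List Int × Bool := ([1, 5, 2, 4], true)

def Spec_first_score (nums : List Int) (flag : Bool) (out : Int) : Prop := out = first_score_alt nums flag
instance (nums : List Int) (flag : Bool) (out : Int) : Decidable (Spec_first_score nums flag out) := by unfold Spec_first_score; infer_instance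

-- ===== CLAIM (what is proved, stated in full; the proofs are below) =====
def Claim_equal_first_score : Prop := ∀ (nums : List Int) (flag : Bool), Dom_first_score nums flag → Pre_first_score nums flag → Spec_first_score nums flag (first_score nums flag)

-- ===== LEMMAS AND PROOFS =====

lemma sub_get (nums : List Int) (i d k : Nat) (hk : k < d) :
    (List.take d (List.drop i nums))[k]? = nums[i + k]? := by
  rw [List.getElem?_take_of_lt hk, List.getElem?_drop]

lemma sub_length (nums : List Int) (i d : Nat) (h : i + d ≤ nums.length) :
    (List.take d (List.drop i nums)).length = d := by
  simp; omega

lemma sub_head? (nums : List Int) (i d : Nat) (hd : 1 ≤ d) :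
    (List.take d (List.drop i nums)).head? = nums[i]? := by
  rw [List.head?_eq_getElem?]
  simpa using sub_get nums i d 0 (by omega)

lemma sub_getLast? (nums : List Int) (i d : Nat) (hd : 1 ≤ d) (h : i + d ≤ nums.length) :
    (List.take d (List.drop i nums)).getLast? = nums[i + (d - 1)]? := by
  rw [List.getLast?_eq_getElem?, sub_length nums i d h]
  exact sub_get nums i d (d - 1) (by omega)

lemma sub_tail (nums : List Int) (i d : Nat) :
    (List.take d (List.drop i nums)).tail = List.take (d - 1) (List.drop (i + 1) nums) := by
  rw [← List.drop_one, List.drop_take, List.drop_one, List.tail_drop]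

lemma sub_dropLast (nums : List Int) (i d : Nat) (h : i + d ≤ nums.length) :
    (List.take d (List.drop i nums)).dropLast = List.take (d - 1) (List.drop i nums) := by
  rw [List.dropLast_eq_take, List.take_take, sub_length nums i d h]
  congr 1; omega

lemma if_max (a b : Int) : (if a ≤ b then b else a) = max b a := by
  rw [max_comm, max_def]

lemma if_min (a b : Int) : (if a ≤ b then a else b) = min b a := by
  rw [min_comm, min_def]

lemma key (nums : List Int) :
    ∀ d i flag, 1 ≤ d → i + d ≤ nums.length →
      first_score (List.take d (List.drop i nums)) flag = solveB nums i d flag := by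
  intro d
  induction d using Nat.strong_induction_on with
  | _ d IH =>
    intro i flag hd h
    have hlen := sub_length nums i d h
    match d with
    | 1 =>
      rw [first_score, if_pos hlen]
      simp [solveB, List.headD_eq_head?_getD, sub_head? nums i 1 (by omega)]
    | 2 =>
      rw [first_score, hlen]
      have h0 := sub_head? nums i 2 (by omega)
      have h1 := sub_get nums i 2 1 (by omega)
      cases flag <;>
        simp [solveB, List.headD_eq_head?_getD, h0, h1, List.getD_eq_getElem?_getD]
    | (d' + 3) =>
      rw [first_score, hlen]
      have htail := sub_tail nums i (d' + 3)
      have hdrop := sub_dropLast nums i (d' + 3) h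
      have iht : ∀ fl, first_score (List.take (d' + 2) (List.drop (i + 1) nums)) fl
          = solveB nums (i + 1) (d' + 2) fl := fun fl =>
        IH (d' + 2) (by omega) (i + 1) fl (by omega) (by omega)
      have ihd : ∀ fl, first_score (List.take (d' + 2) (List.drop i nums)) fl
          = solveB nums i (d' + 2) fl := fun fl =>
        IH (d' + 2) (by omega) i fl (by omega) (by omega)
      have hh := sub_head? nums i (d' + 3) (by omega)
      have hl := sub_getLast? nums i (d' + 3) (by omega) h
      have hidx : i + (d' + 3 - 1) = i + (d' + 1) + 1 := by omega
      rw [hidx] at hl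
      rw [if_neg (by omega : ¬(d' + 3 = 1)), dif_neg (by omega : ¬(d' + 3 = 0))]
      simp only [htail, hdrop, show (d' + 3 : Nat) - 1 = d' + 2 from rfl, iht, ihd,
        List.headD_eq_head?_getD, List.getLastD_eq_getLast?, hh, hl]
      cases flag
      · rw [if_neg (by simp : ¬(false = true)), if_neg (by omega : ¬(d' + 3 = 2))]
        conv_rhs => rw [solveB]
        simp only [Bool.false_eq_true, if_false, ite_false,
          if_neg (by omega : ¬(d' + 1 = 0)), List.getD_eq_getElem?_getD]
        rw [if_min]
      · rw [if_pos rfl, if_neg (by omega : ¬(d' + 3 = 2))]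
        conv_rhs => rw [solveB]
        simp only [if_true, ite_true,
          if_neg (by omega : ¬(d' + 1 = 0)), List.getD_eq_getElem?_getD]
        rw [if_max]

-- ===== VERDICT (by name: the statement is the Claim_ definition above) =====
theorem first_score_spec : Claim_equal_first_score := by
  intro nums flag _ hpre
  unfold Spec_first_score first_score_alt
  have h := key nums nums.length 0 flag
    (by cases nums with | nil => exact absurd rfl hpre | cons a l => simp)
    (by omega)
  simpa using h
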